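-- pv_equiv track=rewrite | github.com/shivangidhiman/CSE101 | Betweenness-Centrality.py | all_shortest_paths
-- ===== SOURCE A (Python) =====
-- def all_shortest_paths(paths):
--
-- 	short_path_list=[]
-- 	Min=10000000
-- 	for i in paths:
-- 		if(len(i)<Min):
-- 			Min=len(i)
-- 	for i in paths:
-- 		if(len(i)==Min):
-- 			short_path_list.append(i)
--
-- 	return short_path_list
-- ===== SOURCE B (Python) =====
-- def all_shortest_paths(paths):
--     Min = 10000000
--     short_path_list = []
--     for i in paths:
--         if len(i) < Min:
--             Min = len(i)
--             short_path_list = [i]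
--         elif len(i) == Min:
--             short_path_list.append(i)
--     return short_path_list
-- ===== Notes on version B (the rewrite author's own statement) =====
-- stated objective: alternative
-- what changed: B replaces A's two passes (one to find the minimum length, one to collect paths of that length) with a single pass maintaining the pair (current min, current collection), resetting the collection whenever a strictly shorter path appears; the 10000000 sentinel initialisation is kept.
import Mathlib
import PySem

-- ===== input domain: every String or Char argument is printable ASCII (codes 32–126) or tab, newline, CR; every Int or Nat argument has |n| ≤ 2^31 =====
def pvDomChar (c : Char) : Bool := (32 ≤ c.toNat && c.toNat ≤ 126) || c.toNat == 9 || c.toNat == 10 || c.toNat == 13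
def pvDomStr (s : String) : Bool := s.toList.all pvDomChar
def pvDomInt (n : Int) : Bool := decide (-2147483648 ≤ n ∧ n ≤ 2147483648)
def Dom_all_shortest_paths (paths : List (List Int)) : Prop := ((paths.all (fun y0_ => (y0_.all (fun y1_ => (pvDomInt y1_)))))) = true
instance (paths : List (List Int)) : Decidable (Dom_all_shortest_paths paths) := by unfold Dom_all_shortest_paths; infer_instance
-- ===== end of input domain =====

-- B merges A's two passes (find min length, then collect) into one accumulator-maintaining pass; alternative decomposition, same O(n) cost.


-- ===== PORT A =====
-- first loop: find the minimum length (starting from the 10000000 sentinel)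
def aspMinFold (m : Int) (paths : List (List Int)) : Int :=
  paths.foldl (fun m i => if (i.length : Int) < m then (i.length : Int) else m) m

def all_shortest_paths (paths : List (List Int)) : List (List Int) :=
  let Min := aspMinFold 10000000 paths
  paths.foldl (fun acc i => if (i.length : Int) = Min then acc ++ [i] else acc) []

-- ===== PORT B =====
-- single pass over paths keeping state (Min, short_path_list)
def aspStepB (s : Int × List (List Int)) (i : List Int) : Int × List (List Int) :=
  if (i.length : Int) < s.1 then ((i.length : Int), [i])
  else if (i.length : Int) = s.1 then (s.1, s.2 ++ [i])
  else s

def all_shortest_paths_alt (paths : List (List Int)) : List (List Int) :=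
  (paths.foldl aspStepB (10000000, [])).2

-- ===== PRECONDITION & SPEC =====
def Spec_all_shortest_paths (paths : List (List Int)) (out : List (List Int)) : Prop := out = all_shortest_paths_alt paths
instance (paths : List (List Int)) (out : List (List Int)) : Decidable (Spec_all_shortest_paths paths out) := by unfold Spec_all_shortest_paths; infer_instance

-- ===== CLAIM (what is proved, stated in full; the proofs are below) =====
def Claim_equal_all_shortest_paths : Prop := ∀ (paths : List (List Int)), Dom_all_shortest_paths paths → Spec_all_shortest_paths paths (all_shortest_paths paths)

-- ===== LEMMAS AND PROOFS =====

theorem aspMinFold_cons (m : Int) (i : List Int) (rest : List (List Int)) :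
    aspMinFold m (i :: rest) = aspMinFold (if (i.length : Int) < m then (i.length : Int) else m) rest := by
  simp [aspMinFold]

theorem aspMinFold_le (paths : List (List Int)) (m : Int) : aspMinFold m paths ≤ m := by
  induction paths generalizing m with
  | nil => simp [aspMinFold]
  | cons i rest ih =>
    rw [aspMinFold_cons]
    split_ifs with h
    · exact le_trans (ih (i.length : Int)) (le_of_lt h)
    · exact ih m

-- loop invariant of B's single pass: the state after a prefix is (running minimum,
-- collection of the seen paths of that length), discarded whenever a strictly shorter path appears
theorem aspFold_inv (paths : List (List Int)) (m : Int) (acc : List (List Int)) :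
    paths.foldl aspStepB (m, acc) =
      (aspMinFold m paths,
        (if aspMinFold m paths < m then [] else acc) ++
          paths.filter (fun i => decide ((i.length : Int) = aspMinFold m paths))) := by
  induction paths generalizing m acc with
  | nil => simp [aspMinFold]
  | cons i rest ih =>
    rw [List.foldl_cons, aspMinFold_cons]
    by_cases h1 : (i.length : Int) < m
    · have hstep : aspStepB (m, acc) i = ((i.length : Int), [i]) := by
        simp [aspStepB, h1]
      rw [hstep, if_pos h1, ih]
      have hM : aspMinFold (i.length : Int) rest ≤ (i.length : Int) := aspMinFold_le rest _
      rw [if_pos (lt_of_le_of_lt hM h1)]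
      rcases lt_or_eq_of_le hM with hlt | heq
      · rw [if_pos hlt]
        have hne : ¬((i.length : Int) = aspMinFold (i.length : Int) rest) := by omega
        simp [hne]
      · rw [if_neg (by omega)]
        simp [heq]
    · rw [if_neg h1]
      have hM : aspMinFold m rest ≤ m := aspMinFold_le rest m
      by_cases h2 : (i.length : Int) = m
      · have hstep : aspStepB (m, acc) i = (m, acc ++ [i]) := by
          simp [aspStepB, h2]
        rw [hstep, ih]
        rcases lt_or_eq_of_le hM with hlt | heq
        · rw [if_pos hlt, if_pos hlt]
          have hne : ¬((i.length : Int) = aspMinFold m rest) := by omega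
          simp [hne]
        · rw [if_neg (by omega), if_neg (by omega)]
          have he : (i.length : Int) = aspMinFold m rest := by omega
          simp [he]
      · have hstep : aspStepB (m, acc) i = (m, acc) := by
          simp [aspStepB, h1, h2]
        rw [hstep, ih]
        have hne : ¬((i.length : Int) = aspMinFold m rest) := by omega
        simp [hne]

-- ===== VERDICT (by name: the statement is the Claim_ definition above) =====
theorem all_shortest_paths_spec : Claim_equal_all_shortest_paths := by
  intro paths _
  unfold Spec_all_shortest_paths all_shortest_paths all_shortest_paths_alt
  rw [PySem.List.foldl_append_ite_eq_filter, aspFold_inv paths 10000000 []]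
  split_ifs <;> simp
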